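-- pv_equiv track=rewrite | github.com/Vilmo18/Agentic-Debt | traces/DouDizhuPoker_DefaultOrganization_20250915221401/rules.py | _find_consecutive_run_with_min_length
-- ===== SOURCE A (Python) =====
-- from typing import List, Dict, Tuple, Optional
--
-- def _is_consecutive(ranks: List[int]) -> bool:
--     return all(b == a + 1 for a, b in zip(ranks, ranks[1:]))
--
-- def _find_consecutive_run_with_min_length(values: List[int], length: int) -> Optional[List[int]]:
--     """
--     From a sorted list of values, find a consecutive run of exact length.
--     Returns the first such run (lowest), else None.
--     """
--     if len(values) < length:
--         return None
--     # sliding window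
--     for i in range(0, len(values) - length + 1):
--         window = values[i:i+length]
--         if _is_consecutive(window):
--             return window
--     return None
-- ===== SOURCE B (Python) =====
-- from typing import List, Optional
--
-- def _find_consecutive_run_with_min_length(values: List[int], length: int) -> Optional[List[int]]:
--     """Single pass: track the length of the consecutive run ending at i;
--     the first index where it reaches `length` yields the first (lowest) window."""
--     if length < 1 or len(values) < length:
--         return None
--     run = 1
--     for i in range(len(values)):
--         if i > 0:
--             run = run + 1 if values[i] == values[i - 1] + 1 else 1
--         if run >= length:
--             return values[i - length + 1:i + 1]
--     return None
-- ===== Notes on version B (the rewrite author's own statement) =====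
-- stated objective: faster
-- what changed: Replaces the sliding-window rescan (slice each window and re-check all its adjacent pairs) by a single pass that tracks the length of the consecutive run ending at the current index and returns the first window where it reaches the requested length.
-- outside the precondition, e.g. on _find_consecutive_run_with_min_length([], 0): A returns [], B returns None; on _find_consecutive_run_with_min_length([1, 3], -1): A returns [1], B returns None
import Mathlib
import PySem

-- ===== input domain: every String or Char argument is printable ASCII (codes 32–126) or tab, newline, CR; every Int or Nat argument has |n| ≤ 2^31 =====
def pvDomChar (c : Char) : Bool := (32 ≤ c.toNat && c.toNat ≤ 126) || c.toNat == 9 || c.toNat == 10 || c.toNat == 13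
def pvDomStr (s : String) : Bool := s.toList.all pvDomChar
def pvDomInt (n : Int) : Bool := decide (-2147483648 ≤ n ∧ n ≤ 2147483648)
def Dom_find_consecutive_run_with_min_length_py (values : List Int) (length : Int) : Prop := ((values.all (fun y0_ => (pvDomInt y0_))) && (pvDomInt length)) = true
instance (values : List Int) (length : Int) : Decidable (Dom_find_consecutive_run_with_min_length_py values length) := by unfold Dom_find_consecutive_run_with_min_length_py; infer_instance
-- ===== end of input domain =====

-- B replaces A's per-window rescan by a single pass tracking the current consecutive-run
-- length (objective: faster; a timing run measures the speed-up).


-- ===== PORT A =====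
-- all(b == a + 1 for a, b in zip(ranks, ranks[1:]))
def pyIsConsecutive (ranks : List Int) : Bool :=
  (ranks.zip (PySem.List.slice ranks (some 1) none)).all (fun p => p.2 == p.1 + 1)

-- the 'for i in range(0, stop)' loop with its early return, i counting up
def aLoop (values : List Int) (length : Int) (i stop : Int) : Option (List Int) :=
  if i < stop then
    let window := PySem.List.slice values (some i) (some (i + length))
    if pyIsConsecutive window then some window else aLoop values length (i+1) stop
  else none
termination_by (stop - i).toNat
decreasing_by omega

def find_consecutive_run_with_min_length_py (values : List Int) (length : Int) : Option (List Int) :=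
  if (values.length : Int) < length then none
  else aLoop values length 0 ((values.length : Int) - length + 1)

-- ===== PORT B =====
-- single pass: 'run' is the length of the consecutive run ending at index i-1 (1 at i = 0)
def bGo (values : List Int) (length : Int) (i : Nat) (run : Int) : Option (List Int) :=
  if h : i < values.length then
    let run' := if 0 < i then (if values.getD i 0 == values.getD (i-1) 0 + 1 then run + 1 else 1) else run
    if length ≤ run' then
      some (PySem.List.slice values (some ((i : Int) - length + 1)) (some ((i : Int) + 1)))
    else bGo values length (i+1) run'
  else none
termination_by values.length - i

def find_consecutive_run_with_min_length_py_alt (values : List Int) (length : Int) : Option (List Int) :=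
  if length < 1 ∨ (values.length : Int) < length then none
  else bGo values length 0 1

-- ===== PRECONDITION & SPEC =====
-- Pre_ excludes length ≤ 0, where A's value (the empty or a shrunken negative-slice window,
-- always 'consecutive') is an accident of Python slice semantics; B returns None there.
def Pre_find_consecutive_run_with_min_length_py (values : List Int) (length : Int) : Prop :=
  1 ≤ length

instance (values : List Int) (length : Int) : Decidable (Pre_find_consecutive_run_with_min_length_py values length) := by unfold Pre_find_consecutive_run_with_min_length_py; infer_instance

def pvWitness_find_consecutive_run_with_min_length_py : List Int × Int := ([1, 2, 4], 2)

def Spec_find_consecutive_run_with_min_length_py (values : List Int) (length : Int) (out : Option (List Int)) : Prop := out = find_consecutive_run_with_min_length_py_alt values length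
instance (values : List Int) (length : Int) (out : Option (List Int)) : Decidable (Spec_find_consecutive_run_with_min_length_py values length out) := by unfold Spec_find_consecutive_run_with_min_length_py; infer_instance

-- ===== CLAIM (what is proved, stated in full; the proofs are below) =====
def Claim_equal_find_consecutive_run_with_min_length_py : Prop := ∀ (values : List Int) (length : Int), Dom_find_consecutive_run_with_min_length_py values length → Pre_find_consecutive_run_with_min_length_py values length → Spec_find_consecutive_run_with_min_length_py values length (find_consecutive_run_with_min_length_py values length)

-- ===== LEMMAS AND PROOFS =====

-- vAt e: values[e] (0 default, only read in range); goodB e: values[e] extends the run at e-1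
def vAt (values : List Int) (e : Nat) : Int := values.getD e 0
def goodB (values : List Int) (e : Nat) : Bool := vAt values e == vAt values (e-1) + 1

-- Rrun e = length of the consecutive run ending at index e
def Rrun (values : List Int) : Nat → Nat
  | 0 => 0 + 1
  | e+1 => if goodB values (e+1) then Rrun values e + 1 else 1

-- Wb i = the window [i, i+L) is consecutive
def Wb (values : List Int) (L : Nat) (i : Nat) : Bool :=
  (List.range (L-1)).all (fun j => goodB values (i+j+1))

-- window element k of values[i:i+L] is values[i+k]
lemma window_getD (values : List Int) (i L k : Nat) (hk : k < L) (hin : i + L ≤ values.length) :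
    ((values.drop i).take L).getD k 0 = values.getD (i + k) 0 := by
  simp [List.getD_eq_getElem?_getD, List.getElem?_take, hk, List.getElem?_drop]

-- all adjacent pairs, via the zip with the tail
lemma pyIsConsecutive_iff (w : List Int) :
    pyIsConsecutive w = true ↔ ∀ k, k + 1 < w.length → w.getD (k+1) 0 = w.getD k 0 + 1 := by
  induction w with
  | nil => simp [pyIsConsecutive]
  | cons a t ih =>
    cases t with
    | nil => simp [pyIsConsecutive, PySem.List.slice_from_one]
    | cons b t' =>
      rw [pyIsConsecutive, PySem.List.slice_from_one] at *
      simp only [List.tail_cons, List.zip_cons_cons, List.all_cons, Bool.and_eq_true,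
        beq_iff_eq] at *
      constructor
      · rintro ⟨h1, h2⟩ k hk
        match k with
        | 0 => simpa using h1
        | (k+1) =>
          have := ih.1 h2 k (by simp at hk ⊢; omega)
          simpa [List.getD_cons_succ] using this
      · intro h
        refine ⟨?_, ih.2 ?_⟩
        · have := h 0 (by simp)
          simpa using this
        · intro k hk
          have := h (k+1) (by simp at hk ⊢; omega)
          simpa [List.getD_cons_succ] using this

lemma Wb_iff (values : List Int) (L i : Nat) :
    Wb values L i = true ↔ ∀ j, j < L - 1 → goodB values (i+j+1) = true := by
  simp [Wb, List.all_eq_true, List.mem_range]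

lemma goodB_eq (values : List Int) (e : Nat) :
    goodB values e = true ↔ values.getD e 0 = values.getD (e-1) 0 + 1 := by
  simp [goodB, vAt]

-- A's window test equals Wb
lemma pyIsConsecutive_window (values : List Int) (i L : Nat) (hin : i + L ≤ values.length) :
    pyIsConsecutive ((values.drop i).take L) = Wb values L i := by
  have hlen : ((values.drop i).take L).length = L := by
    simp [List.length_take, List.length_drop]; omega
  rw [Bool.eq_iff_iff, pyIsConsecutive_iff, Wb_iff]
  constructor
  · intro h j hj
    rw [goodB_eq]
    have := h j (by omega)
    rw [window_getD values i L (j+1) (by omega) hin, window_getD values i L j (by omega) hin] at this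
    simpa [show i + j + 1 - 1 = i + j from by omega,
      show i + (j+1) = i + j + 1 from by omega] using this
  · intro h k hk
    rw [hlen] at hk
    rw [window_getD values i L (k+1) (by omega) hin, window_getD values i L k (by omega) hin]
    have := (goodB_eq values (i+k+1)).1 (h k (by omega))
    simpa [show i + k + 1 - 1 = i + k from by omega,
      show i + (k+1) = i + k + 1 from by omega] using this

-- ── A normal form: the loop is a first-match search over the start indices ──
lemma aLoop_eq_find? (values : List Int) (L : Int) (hL : 0 ≤ L) :
    ∀ (m s : Nat), (∀ j, s ≤ j → j < s + m → j + L.toNat ≤ values.length) →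
    aLoop values L (s : Int) ((s + m : Nat) : Int) =
      ((List.range' s m).find? (Wb values L.toNat)).map (fun i => (values.drop i).take L.toNat) := by
  intro m
  induction m with
  | zero =>
    intro s _
    rw [aLoop, if_neg (by push_cast; omega)]
    simp
  | succ m ih =>
    intro s hb
    have hi : s + L.toNat ≤ values.length := hb s (le_refl _) (by omega)
    have hslice : PySem.List.slice values (some (s : Int)) (some ((s : Int) + L)) =
        (values.drop s).take L.toNat := by
      have hcast : ((s : Int) + L) = ((s : Int) + (L.toNat : Int)) := by omega
      rw [hcast, PySem.List.slice_natCast_add]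
    rw [aLoop, if_pos (by push_cast; omega)]
    simp only [hslice, pyIsConsecutive_window values s L.toNat hi]
    rw [List.range'_succ, List.find?_cons]
    cases hW : Wb values L.toNat s with
    | true => simp
    | false =>
      have hrec := ih (s+1) (fun j h1 h2 => hb j (by omega) (by omega))
      have hc1 : (s : Int) + 1 = ((s + 1 : Nat) : Int) := by push_cast; ring
      have hc2 : ((s + (m+1) : Nat) : Int) = (((s+1) + m : Nat) : Int) := by push_cast; ring
      rw [hc1, hc2]
      exact hrec

-- ── run-length facts ──
lemma Rrun_pos (values : List Int) (e : Nat) : 1 ≤ Rrun values e := by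
  cases e with
  | zero => simp [Rrun]
  | succ e => rw [Rrun]; split <;> omega

lemma Rrun_le (values : List Int) (e : Nat) : Rrun values e ≤ e + 1 := by
  induction e with
  | zero => simp [Rrun]
  | succ e ih => rw [Rrun]; split <;> omega

-- k ≤ run length at e  ↔  the last k positions up to e are all consecutive steps
lemma Rrun_ge_iff (values : List Int) :
    ∀ (e k : Nat), 1 ≤ k →
      (k ≤ Rrun values e ↔ k ≤ e + 1 ∧ ∀ j : Nat, e + 1 < j + k → j ≤ e → goodB values j = true) := by
  intro e
  induction e with
  | zero =>
    intro k hk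
    constructor
    · intro h
      have : k = 1 := by have := Rrun_le values 0; omega
      subst this
      exact ⟨by omega, fun j hj1 hj2 => by omega⟩
    · rintro ⟨h1, _⟩
      simp only [Rrun]; omega
  | succ e ih =>
    intro k hk
    cases hg : goodB values (e+1) with
    | true =>
      rw [Rrun, hg, if_pos rfl]
      rcases Nat.eq_or_lt_of_le hk with h1 | h2
      · constructor
        · intro _
          exact ⟨by omega, fun j hj1 hj2 => by omega⟩
        · intro _
          have := Rrun_pos values e; omega
      · have hk1 : 1 ≤ k - 1 := by omega
        have hIH := ih (k-1) hk1
        constructor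
        · intro h
          obtain ⟨hb, hall⟩ := hIH.1 (by omega)
          refine ⟨by omega, fun j hj1 hj2 => ?_⟩
          rcases Nat.lt_or_ge j (e+1) with hj | hj
          · exact hall j (by omega) (by omega)
          · have : j = e + 1 := by omega
            subst this; exact hg
        · rintro ⟨hb, hall⟩
          have : k - 1 ≤ Rrun values e :=
            hIH.2 ⟨by omega, fun j hj1 hj2 => hall j (by omega) (by omega)⟩
          omega
    | false =>
      rw [Rrun, hg]
      simp only [Bool.false_eq_true, if_false]
      constructor
      · intro h
        have : k = 1 := by omega
        subst this
        exact ⟨by omega, fun j hj1 hj2 => by omega⟩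
      · rintro ⟨hb, hall⟩
        by_contra hlt
        have := hall (e+1) (by omega) (by omega)
        rw [this] at hg; exact absurd hg (by simp)

-- bridge: window of length L starting at i consecutive ↔ run length ≥ L at its last index
lemma Wb_iff_Rrun (values : List Int) (L i : Nat) (hL : 1 ≤ L) :
    Wb values L i = true ↔ L ≤ Rrun values (i + L - 1) := by
  rw [Wb_iff, Rrun_ge_iff values (i + L - 1) L hL]
  constructor
  · intro h
    refine ⟨by omega, fun j hj1 hj2 => ?_⟩
    have := h (j - i - 1) (by omega)
    simpa [show i + (j - i - 1) + 1 = j from by omega] using this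
  · rintro ⟨hb, hall⟩ j hj
    exact hall (i + j + 1) (by omega) (by omega)

-- ── B normal form: the single pass is a first-match search over the end indices ──
lemma bGo_eq (values : List Int) (L : Int) :
    ∀ (i : Nat) (run : Int),
      run = (if i = 0 then 1 else (Rrun values (i-1) : Int)) →
      bGo values L i run =
        ((List.range' i (values.length - i)).find? (fun e => decide (L ≤ (Rrun values e : Int)))).map
          (fun e => PySem.List.slice values (some ((e : Int) - L + 1)) (some ((e : Int) + 1))) := by
  intro i
  induction hi : values.length - i using Nat.strong_induction_on generalizing i with
  | _ m ih =>
  subst hi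
  intro run hrun
  by_cases h : i < values.length
  · have hrun' : (if 0 < i then (if values.getD i 0 == values.getD (i-1) 0 + 1 then run + 1 else 1) else run)
        = (Rrun values i : Int) := by
      subst hrun
      rcases Nat.eq_zero_or_pos i with h0 | h0
      · subst h0; simp [Rrun]
      · obtain ⟨i', rfl⟩ : ∃ i', i = i' + 1 := ⟨i - 1, by omega⟩
        simp only [if_pos h0, if_neg (Nat.succ_ne_zero i'), Nat.add_sub_cancel]
        by_cases hg : goodB values (i'+1) = true
        · rw [if_pos (by simpa [goodB, vAt] using hg), Rrun, if_pos hg]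
          push_cast; ring
        · rw [if_neg (by simpa [goodB, vAt] using hg), Rrun, if_neg hg]
          norm_cast
    have hrange : List.range' i (values.length - i) =
        i :: List.range' (i+1) (values.length - (i+1)) := by
      have h1 : values.length - i = (values.length - (i+1)) + 1 := by omega
      rw [h1, List.range'_succ]
    rw [bGo, dif_pos h, hrun', hrange]
    by_cases hp : L ≤ (Rrun values i : Int)
    · rw [List.find?_cons_of_pos (by simpa using hp)]
      simp [hp]
    · rw [List.find?_cons_of_neg (by simpa using hp)]
      simp only [if_neg hp]
      exact ih (values.length - (i+1)) (by omega) (i+1) rfl _ (by simp)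
  · rw [bGo, dif_neg h, show values.length - i = 0 from by omega]
    simp

-- first match in a range', characterised
lemma find?_range'_eq_some_iff (p : Nat → Bool) :
    ∀ (m s x : Nat), ((List.range' s m).find? p = some x ↔
      (s ≤ x ∧ x < s + m ∧ p x = true ∧ ∀ y, s ≤ y → y < x → p y = false)) := by
  intro m
  induction m with
  | zero =>
    intro s x
    constructor
    · intro h; exact absurd h (by simp)
    · rintro ⟨h1, h2, _, _⟩; exact absurd h2 (by omega)
  | succ m ih =>
    intro s x
    rw [List.range'_succ]
    by_cases hp : p s = true
    · rw [List.find?_cons_of_pos hp]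
      constructor
      · intro h
        injection h with h; subst h
        exact ⟨le_refl _, by omega, hp, fun y h1 h2 => by omega⟩
      · rintro ⟨h1, h2, h3, h4⟩
        have hx : s = x := by
          by_contra hne
          have := h4 s (le_refl _) (by omega)
          rw [this] at hp; exact absurd hp (by simp)
        rw [hx]
    · rw [List.find?_cons_of_neg (by simpa using hp)]
      rw [ih (s+1) x]
      constructor
      · rintro ⟨h1, h2, h3, h4⟩
        refine ⟨by omega, by omega, h3, fun y hy1 hy2 => ?_⟩
        rcases Nat.eq_or_lt_of_le hy1 with hy | hy
        · rw [← hy]; simpa using hp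
        · exact h4 y (by omega) hy2
      · rintro ⟨h1, h2, h3, h4⟩
        have hsx : s ≠ x := by
          rintro rfl; exact absurd h3 (by simpa using hp)
        exact ⟨by omega, by omega, h3, fun y hy1 hy2 => h4 y (by omega) hy2⟩

lemma find?_range'_eq_none_iff (p : Nat → Bool) (m s : Nat) :
    ((List.range' s m).find? p = none ↔ ∀ y, s ≤ y → y < s + m → p y = false) := by
  rw [List.find?_eq_none]
  constructor
  · intro h y h1 h2
    have := h y (by rw [List.mem_range'_1]; exact ⟨h1, h2⟩)
    simpa using this
  · intro h x hx
    rw [List.mem_range'_1] at hx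
    simp [h x hx.1 hx.2]

-- ── the two searches find corresponding positions ──
lemma find_correspondence (values : List Int) (L : Nat) (hL : 1 ≤ L) (hn : L ≤ values.length) :
    (List.range' 0 values.length).find? (fun e => decide ((L : Int) ≤ (Rrun values e : Int))) =
      ((List.range' 0 (values.length - L + 1)).find? (Wb values L)).map (fun i => i + L - 1) := by
  cases hA : (List.range' 0 (values.length - L + 1)).find? (Wb values L) with
  | none =>
    rw [find?_range'_eq_none_iff] at hA
    simp only [Option.map_none]
    rw [find?_range'_eq_none_iff]
    intro e he0 he
    simp only [decide_eq_false_iff_not, not_le]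
    by_contra hcon
    push_neg at hcon
    have hRe : L ≤ Rrun values e := by exact_mod_cast hcon
    have hLe : L ≤ e + 1 := le_trans hRe (Rrun_le values e)
    have hW : Wb values L (e + 1 - L) = true := by
      rw [Wb_iff_Rrun values L _ hL, show e + 1 - L + L - 1 = e from by omega]
      exact hRe
    have := hA (e + 1 - L) (by omega) (by omega)
    rw [hW] at this; exact absurd this (by simp)
  | some i =>
    rw [find?_range'_eq_some_iff] at hA
    obtain ⟨_, hi, hWi, hmin⟩ := hA
    simp only [Option.map_some]
    rw [find?_range'_eq_some_iff]
    refine ⟨by omega, by omega, ?_, ?_⟩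
    · simp only [decide_eq_true_eq]
      have := (Wb_iff_Rrun values L i hL).1 hWi
      exact_mod_cast this
    · intro e he0 he
      simp only [decide_eq_false_iff_not, not_le]
      by_contra hcon
      push_neg at hcon
      have hRe : L ≤ Rrun values e := by exact_mod_cast hcon
      have hLe : L ≤ e + 1 := le_trans hRe (Rrun_le values e)
      have hW : Wb values L (e + 1 - L) = true := by
        rw [Wb_iff_Rrun values L _ hL, show e + 1 - L + L - 1 = e from by omega]
        exact hRe
      have := hmin (e + 1 - L) (by omega) (by omega)
      rw [hW] at this; exact absurd this (by simp)

-- ===== VERDICT (by name: the statement is the Claim_ definition above) =====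
theorem find_consecutive_run_with_min_length_py_spec : Claim_equal_find_consecutive_run_with_min_length_py := by
  intro values L _ hPre
  unfold Spec_find_consecutive_run_with_min_length_py
  unfold find_consecutive_run_with_min_length_py find_consecutive_run_with_min_length_py_alt
  unfold Pre_find_consecutive_run_with_min_length_py at hPre
  by_cases hn : (values.length : Int) < L
  · rw [if_pos hn, if_pos (Or.inr hn)]
  · rw [if_neg hn, if_neg (by push_neg; exact ⟨by omega, by push_neg at hn; exact hn⟩)]
    have hLn : L = (L.toNat : Int) := by omega
    have hnL : L.toNat ≤ values.length := by omega
    have hL1 : 1 ≤ L.toNat := by omega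
    have hca : ((values.length : Int) - L + 1) = ((0 + (values.length - L.toNat + 1) : Nat) : Int) := by
      push_cast; omega
    rw [hca, show (0 : Int) = ((0 : Nat) : Int) from rfl,
      aLoop_eq_find? values L (by omega) (values.length - L.toNat + 1) 0 (fun j h1 h2 => by omega)]
    rw [bGo_eq values L 0 1 (by simp), Nat.sub_zero]
    have hLc : (fun e => decide (L ≤ (Rrun values e : Int)))
        = (fun e => decide (((L.toNat : Int)) ≤ (Rrun values e : Int))) := by
      rw [← hLn]
    rw [hLc, find_correspondence values L.toNat hL1 hnL]
    cases hA : (List.range' 0 (values.length - L.toNat + 1)).find? (Wb values L.toNat) with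
    | none => simp [hA]
    | some i =>
      rw [find?_range'_eq_some_iff] at hA
      obtain ⟨_, hi, hWi, _⟩ := hA
      have h1 : ((i + L.toNat - 1 : Nat) : Int) - L + 1 = ((i : Nat) : Int) := by
        push_cast [show 1 ≤ i + L.toNat from by omega]; omega
      have h2 : ((i + L.toNat - 1 : Nat) : Int) + 1 = ((i : Nat) : Int) + ((L.toNat : Nat) : Int) := by
        push_cast [show 1 ≤ i + L.toNat from by omega]; omega
      show some (List.take L.toNat (List.drop i values)) =
        some (PySem.List.slice values (some (((i + L.toNat - 1 : Nat) : Int) - L + 1))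
          (some (((i + L.toNat - 1 : Nat) : Int) + 1)))
      rw [h1, h2, PySem.List.slice_natCast_add]
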